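-- pv_equiv track=rewrite | github.com/eclipse-qrisp/Qrisp | src/qrisp/operators/pauli_operator.py | commute_qw
-- ===== SOURCE A (Python) =====
-- def commute_qw(a,b):
--     """
--     Checks if two Pauli products commute qubit-wise.
--
--     Parameters
--     ----------
--     a : dict
--         A dictionary encoding a Pauli product.
--     b : dict
--         A dictionary encoding a Pauli product.
--
--     Returns
--     -------
--
--     """
--     keys = set()
--     keys.update(set(a.keys()))
--     keys.update(set(b.keys()))
--
--     for key in keys:
--         if a.get(key,"I")!="I" and b.get(key,"I")!="I" and a.get(key,"I")!=b.get(key,"I"):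
--             return False
--     return True
-- ===== SOURCE B (Python) =====
-- def commute_qw(a, b):
--     """Sort both item lists by qubit index and do a two-pointer merge scan;
--     only positions where both sorted streams carry the same key can conflict."""
--     ia = sorted(a.items(), key=lambda t: t[0])
--     ib = sorted(b.items(), key=lambda t: t[0])
--     i = j = 0
--     while i < len(ia) and j < len(ib):
--         ka, va = ia[i]
--         kb, vb = ib[j]
--         if ka < kb:
--             i += 1
--         elif kb < ka:
--             j += 1
--         else:
--             if va != "I" and vb != "I" and va != vb:
--                 return False
--             i += 1
--             j += 1
--     return True
-- ===== Notes on version B (the rewrite author's own statement) =====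
-- stated objective: alternative
-- what changed: B sorts both item lists by qubit index and detects conflicts with a two-pointer merge scan over the two sorted streams, instead of A's single pass over the union key set with three .get-defaulted dictionary probes per key.
import Mathlib
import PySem

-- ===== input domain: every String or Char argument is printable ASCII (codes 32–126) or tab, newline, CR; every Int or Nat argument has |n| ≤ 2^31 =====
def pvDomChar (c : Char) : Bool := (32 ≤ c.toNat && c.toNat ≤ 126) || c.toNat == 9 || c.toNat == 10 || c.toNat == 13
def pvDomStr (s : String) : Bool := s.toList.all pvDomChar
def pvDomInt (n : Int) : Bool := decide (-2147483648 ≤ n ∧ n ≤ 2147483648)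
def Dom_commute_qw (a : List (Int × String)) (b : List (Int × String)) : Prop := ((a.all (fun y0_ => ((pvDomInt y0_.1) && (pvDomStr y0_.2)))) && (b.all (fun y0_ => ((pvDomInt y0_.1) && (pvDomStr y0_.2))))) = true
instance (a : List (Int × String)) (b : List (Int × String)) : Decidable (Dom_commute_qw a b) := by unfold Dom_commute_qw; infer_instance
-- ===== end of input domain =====

-- B sorts both item lists by qubit index and merge-scans them with two pointers; A scans the union key set with .get-defaulted probes (alternative algorithm; return value only).

-- ===== PORT A =====
def commute_qw (a : List (Int × String)) (b : List (Int × String)) : Bool :=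
  let da := PySem.Dict.ofList a
  let db := PySem.Dict.ofList b
  -- keys = set(); keys.update(set(a.keys())); keys.update(set(b.keys()))
  let keys : PySem.Set Int :=
    PySem.Set.update (PySem.Set.update PySem.Set.empty (PySem.Set.ofList da.keys)) (PySem.Set.ofList db.keys)
  -- for key in keys: if a.get(key,"I")!="I" and b.get(key,"I")!="I" and a.get(key,"I")!=b.get(key,"I"): return False / return True
  keys.all (fun k =>
    !(da.getD k "I" != "I" && db.getD k "I" != "I" && da.getD k "I" != db.getD k "I"))

-- ===== PORT B =====
-- the while loop of Source B: the two index pointers become the two remaining suffixes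
def commuteMerge : List (Int × String) → List (Int × String) → Bool
  | [], _ => true
  | _ :: _, [] => true
  | (ka, va) :: ta, (kb, vb) :: tb =>
    if ka < kb then commuteMerge ta ((kb, vb) :: tb)
    else if kb < ka then commuteMerge ((ka, va) :: ta) tb
    else if va != "I" && vb != "I" && va != vb then false
    else commuteMerge ta tb
termination_by xs ys => xs.length + ys.length

def commute_qw_alt (a : List (Int × String)) (b : List (Int × String)) : Bool :=
  -- ia = sorted(a.items(), key=lambda t: t[0]); ib = sorted(b.items(), key=lambda t: t[0])
  let ia := PySem.List.sorted (PySem.Dict.ofList a).items (fun t => t.1) false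
  let ib := PySem.List.sorted (PySem.Dict.ofList b).items (fun t => t.1) false
  commuteMerge ia ib

-- ===== PRECONDITION & SPEC =====
def Spec_commute_qw (a : List (Int × String)) (b : List (Int × String)) (out : Bool) : Prop := out = commute_qw_alt a b
instance (a : List (Int × String)) (b : List (Int × String)) (out : Bool) : Decidable (Spec_commute_qw a b out) := by unfold Spec_commute_qw; infer_instance

-- ===== CLAIM =====
def Claim_equal_commute_qw : Prop := ∀ (a : List (Int × String)) (b : List (Int × String)), Dom_commute_qw a b → Spec_commute_qw a b (commute_qw a b)

-- ===== LEMMAS AND PROOFS =====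

-- the per-pair commutation test shared by both characterisations
def pvOk (v w : String) : Bool := !(v != "I" && w != "I" && v != w)

-- pointwise-on-members congruence for List.all (no such lemma in Mathlib/PySem)
theorem pvAllCongr {α : Type} {l : List α} {f g : α → Bool} (h : ∀ x ∈ l, f x = g x) :
    l.all f = l.all g := by
  induction l with
  | nil => rfl
  | cons x t ih =>
    simp only [List.all_cons, h x (List.mem_cons_self ..),
      ih (fun y hy => h y (List.mem_cons_of_mem _ hy))]

-- on key-strictly-increasing lists the merge scan checks exactly all matching-key pairs
theorem commuteMerge_eq_all (xs ys : List (Int × String)) :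
    xs.Pairwise (fun p q => p.1 < q.1) → ys.Pairwise (fun p q => p.1 < q.1) →
    commuteMerge xs ys = xs.all (fun p => ys.all (fun q => !(p.1 == q.1) || pvOk p.2 q.2)) := by
  induction xs, ys using commuteMerge.induct with
  | case1 ys => intro _ _; simp [commuteMerge]
  | case2 p t => intro _ _; simp [commuteMerge]
  | case3 ka va ta kb vb tb h1 ih =>
    intro hx hy
    rw [List.pairwise_cons] at hx
    rw [show commuteMerge ((ka, va) :: ta) ((kb, vb) :: tb)
          = commuteMerge ta ((kb, vb) :: tb) by rw [commuteMerge]; simp [h1]]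
    rw [ih hx.2 hy]
    have hno : ((kb, vb) :: tb).all (fun q => !((ka : Int) == q.1) || pvOk va q.2) = true := by
      rw [List.all_eq_true]; intro q hq
      have hlt : ka < q.1 := by
        rcases List.mem_cons.mp hq with hq | hq
        · subst hq; exact h1
        · exact lt_trans h1 ((List.pairwise_cons.mp hy).1 q hq)
      simp [show ¬ (ka = q.1) from by omega]
    conv_rhs => rw [List.all_cons]
    rw [hno, Bool.true_and]
  | case4 ka va ta kb vb tb h1 h2 ih =>
    intro hx hy
    rw [List.pairwise_cons] at hy
    rw [show commuteMerge ((ka, va) :: ta) ((kb, vb) :: tb)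
          = commuteMerge ((ka, va) :: ta) tb by rw [commuteMerge]; simp [h1, h2]]
    rw [ih hx hy.2]
    have hcol : ∀ p' ∈ (ka, va) :: ta, (!((p' : Int × String).1 == kb) || pvOk p'.2 vb) = true := by
      intro p' hp'
      have hlt : kb < p'.1 := by
        rcases List.mem_cons.mp hp' with hp' | hp'
        · subst hp'; exact h2
        · exact lt_trans h2 ((List.pairwise_cons.mp hx).1 p' hp')
      simp [show ¬ (p'.1 = kb) from by omega]
    apply pvAllCongr
    intro p hp
    rw [List.all_cons, hcol p hp, Bool.true_and]
  | case5 ka va ta kb vb tb h1 h2 hc =>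
    intro hx hy
    have hk : kb = ka := by omega
    subst hk
    rw [show commuteMerge ((kb, va) :: ta) ((kb, vb) :: tb) = false
          by rw [commuteMerge]; simp [hc]]
    have : pvOk va vb = false := by simp [pvOk, hc]
    simp [List.all_cons, this]
  | case6 ka va ta kb vb tb h1 h2 hc ih =>
    intro hx hy
    have hk : kb = ka := by omega
    subst hk
    rw [List.pairwise_cons] at hx hy
    rw [show commuteMerge ((kb, va) :: ta) ((kb, vb) :: tb) = commuteMerge ta tb
          by rw [commuteMerge]; simp [hc]]
    rw [ih hx.2 hy.2]
    have hhead_tb : tb.all (fun q => !((kb : Int) == q.1) || pvOk va q.2) = true := by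
      rw [List.all_eq_true]; intro q hq
      have := hy.1 q hq
      simp [show ¬ (kb = q.1) from by omega]
    have hta_head : ∀ p ∈ ta, ((kb, vb) :: tb).all (fun q => !((p : Int × String).1 == q.1) || pvOk p.2 q.2)
        = tb.all (fun q => !((p : Int × String).1 == q.1) || pvOk p.2 q.2) := by
      intro p hp
      have := hx.1 p hp
      rw [List.all_cons, show (!((p : Int × String).1 == kb) || pvOk p.2 vb) = true
            from by simp [show ¬ (p.1 = kb) from by omega], Bool.true_and]
    have hok : pvOk va vb = true := by simp [pvOk, hc]
    conv_rhs => rw [List.all_cons]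
    rw [List.all_cons, hhead_tb, Bool.and_true, hok, beq_self_eq_true, Bool.not_true,
      Bool.false_or, Bool.true_and, pvAllCongr hta_head]

-- strict key order and membership of the sorted item lists of a dict
theorem sorted_items_pairwise_lt (a : List (Int × String)) :
    (PySem.List.sorted (PySem.Dict.ofList a).items (fun t => t.1) false).Pairwise
      (fun p q => p.1 < q.1) := by
  have hle := PySem.List.sorted_pairwise (PySem.Dict.ofList a).items (fun t => (t.1 : Int))
  have hnd : ((PySem.List.sorted (PySem.Dict.ofList a).items (fun t => t.1) false).map Prod.fst).Nodup := by
    have hperm : (PySem.List.sorted (PySem.Dict.ofList a).items (fun t => t.1) false).Perm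
        (PySem.Dict.ofList a).items := PySem.List.sorted_perm _ _ _
    have : ((PySem.Dict.ofList a).items.map Prod.fst).Nodup := PySem.Dict.nodup_keys_ofList a
    exact ((hperm.map Prod.fst).nodup_iff).mpr this
  have hne : (PySem.List.sorted (PySem.Dict.ofList a).items (fun t => t.1) false).Pairwise
      (fun p q => p.1 ≠ q.1) := List.pairwise_map.mp hnd
  exact (hle.and hne).imp (fun h => lt_of_le_of_ne h.1 h.2)

-- both programs test exactly: every matching-key item pair of the two dicts commutes
theorem commute_qw_eq (a b : List (Int × String)) : commute_qw a b = commute_qw_alt a b := by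
  unfold commute_qw commute_qw_alt
  have hnda : (PySem.Dict.ofList a).keys.Nodup := PySem.Dict.nodup_keys_ofList a
  have hndb : (PySem.Dict.ofList b).keys.Nodup := PySem.Dict.nodup_keys_ofList b
  rw [commuteMerge_eq_all _ _ (sorted_items_pairwise_lt a) (sorted_items_pairwise_lt b)]
  apply Bool.eq_iff_iff.mpr
  simp only [List.all_eq_true, PySem.List.mem_sorted]
  constructor
  · -- A's union scan ⊨ the pairwise-items condition
    intro h p hp q hq
    by_cases heq : p.1 = q.1
    · obtain ⟨k, v⟩ := p
      obtain ⟨k', w⟩ := q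
      simp only at heq
      subst heq
      have hk : k ∈ (PySem.Dict.ofList a).keys := PySem.Dict.mem_keys_of_mem_items _ hp
      have hmem : k ∈ PySem.Set.update (PySem.Set.update PySem.Set.empty
          (PySem.Set.ofList (PySem.Dict.ofList a).keys)) (PySem.Set.ofList (PySem.Dict.ofList b).keys) := by
        rw [PySem.Set.mem_update, PySem.Set.mem_update, PySem.Set.mem_ofList]
        exact Or.inl (Or.inr hk)
      have hva : (PySem.Dict.ofList a).getD k "I" = v := PySem.Dict.getD_of_mem_items _ hp hnda _
      have hvb : (PySem.Dict.ofList b).getD k "I" = w := PySem.Dict.getD_of_mem_items _ hq hndb _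
      have := h k hmem
      rw [hva, hvb] at this
      have hok : pvOk v w = true := by simpa [pvOk] using this
      simp [hok]
    · simp [heq]
  · -- the pairwise-items condition ⊨ A's union scan
    intro h k hk
    by_cases ha : (PySem.Dict.ofList a).contains k
    · by_cases hb : (PySem.Dict.ofList b).contains k
      · obtain ⟨v, hv⟩ : ∃ v, (PySem.Dict.ofList a).get? k = some v := by
          rw [PySem.Dict.contains_eq_isSome_get?] at ha
          exact Option.isSome_iff_exists.mp ha
        obtain ⟨w, hw⟩ : ∃ w, (PySem.Dict.ofList b).get? k = some w := by
          rw [PySem.Dict.contains_eq_isSome_get?] at hb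
          exact Option.isSome_iff_exists.mp hb
        have hpa : (k, v) ∈ (PySem.Dict.ofList a).items := PySem.Dict.mem_items_of_get?_eq_some _ hv
        have hpb : (k, w) ∈ (PySem.Dict.ofList b).items := PySem.Dict.mem_items_of_get?_eq_some _ hw
        have := h (k, v) hpa (k, w) hpb
        simp only [beq_self_eq_true, Bool.not_true, Bool.false_or] at this
        rw [PySem.Dict.getD_eq_get?_getD, PySem.Dict.getD_eq_get?_getD, hv, hw]
        simpa [pvOk] using this
      · have : (PySem.Dict.ofList b).getD k "I" = "I" :=
          PySem.Dict.getD_of_not_contains _ _ (eq_false_of_ne_true hb)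
        simp [this]
    · have : (PySem.Dict.ofList a).getD k "I" = "I" :=
        PySem.Dict.getD_of_not_contains _ _ (eq_false_of_ne_true ha)
      simp [this]

-- ===== VERDICT =====
theorem commute_qw_spec : Claim_equal_commute_qw := by
  intro a b _
  exact commute_qw_eq a b
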